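-- pv_equiv track=rewrite | github.com/mintu258845/PasswordManager | passwordManager.py | check_password_level
-- ===== SOURCE A (Python) =====
-- import string  # https://docs.python.org/3.6/library/string.html
--
-- def check_password_level(password: str) -> int:
--     """Return the password complexity level for a given password
--
--     Complexity levels:
--         Return complexity 1: If password has only lowercase chars
--         Return complexity 2: Previous level condition and at least 1 digit
--         Return complexity 3: Previous levels condition and at least 1 uppercase char
--         Return complexity 4: Previous levels condition and at least 1 punctuation
--
--     Complexity level exceptions (override previous results):
--         Return complexity 2: password has length >= 8 chars and only lowercase chars
--         Return complexity 3: password has length >= 8 chars and only lowercase and digits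
--
--     :param password: password
--     :returns: complexity level
--     """
--     complexity  = 0
--     SpecialSym = string.punctuation
--
--     if any(char.islower() for char in password):
--         complexity = 2 if len(password) >=8 else 1
--
--         if any(char.isdigit() for char in password):
--             complexity = 3 if len(password) >=8 else 2
--
--             if any(char.isupper() for char in password):
--                 complexity = 3
--
--                 if any(char in SpecialSym for char in password):
--                     complexity = 4
--     return complexity
--     pass
-- ===== SOURCE B (Python) =====
-- import string
--
-- def check_password_level(password: str) -> int:
--     has_lower = has_digit = has_upper = has_punct = False
--     for ch in password:
--         has_lower = has_lower or ch.islower()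
--         has_digit = has_digit or ch.isdigit()
--         has_upper = has_upper or ch.isupper()
--         has_punct = has_punct or ch in string.punctuation
--     long_enough = len(password) >= 8
--     if not has_lower:
--         return 0
--     if not has_digit:
--         return 2 if long_enough else 1
--     if not has_upper:
--         return 3 if long_enough else 2
--     return 4 if has_punct else 3
-- ===== Notes on version B (the rewrite author's own statement) =====
-- stated objective: simpler
-- what changed: One pass collecting four character-class flags, then a flat early-return chain, instead of four separate any()-scans inside nested short-circuit ifs with an overwritten accumulator.
import Mathlib
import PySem

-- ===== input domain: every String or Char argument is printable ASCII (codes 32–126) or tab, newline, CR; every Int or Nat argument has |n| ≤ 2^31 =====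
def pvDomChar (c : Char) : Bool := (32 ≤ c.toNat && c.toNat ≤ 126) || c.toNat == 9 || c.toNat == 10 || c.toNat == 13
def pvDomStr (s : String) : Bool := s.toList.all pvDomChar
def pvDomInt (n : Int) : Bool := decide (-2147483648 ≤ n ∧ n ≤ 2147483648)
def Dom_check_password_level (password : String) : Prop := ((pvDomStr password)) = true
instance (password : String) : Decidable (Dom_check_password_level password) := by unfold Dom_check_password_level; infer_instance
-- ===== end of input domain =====

-- B replaces A's four separate any()-scans in nested short-circuit ifs by one pass
-- collecting four character-class flags followed by a flat early-return chain (objective: simpler).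


-- ===== PORT A =====
-- string.punctuation, as a list of chars (exact: Python's string.punctuation)
def pvPunctuation : List Char := "!\"#$%&'()*+,-./:;<=>?@[\\]^_`{|}~".toList

def check_password_level (password : String) : Int :=
  let cs := password.toList
  let complexity : Int := 0
  if cs.any PySem.Chars.islower then
    let complexity := if PySem.Chars.len cs ≥ 8 then (2 : Int) else 1
    if cs.any PySem.Chars.isdigit then
      let complexity := if PySem.Chars.len cs ≥ 8 then (3 : Int) else 2
      if cs.any PySem.Chars.isupper then
        let complexity := (3 : Int)
        if cs.any (fun c => pvPunctuation.contains c) then (4 : Int)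
        else complexity
      else complexity
    else complexity
  else complexity

-- ===== PORT B =====
-- one pass accumulating the four flags (Source B's for-loop), then the flat chain
def pvFlagsStep (st : Bool × Bool × Bool × Bool) (c : Char) : Bool × Bool × Bool × Bool :=
  (st.1 || PySem.Chars.islower c,
   st.2.1 || PySem.Chars.isdigit c,
   st.2.2.1 || PySem.Chars.isupper c,
   st.2.2.2 || pvPunctuation.contains c)

def check_password_level_alt (password : String) : Int :=
  let flags := password.toList.foldl pvFlagsStep (false, false, false, false)
  let long_enough := PySem.Chars.len password.toList ≥ 8
  if !flags.1 then 0
  else if !flags.2.1 then (if long_enough then 2 else 1)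
  else if !flags.2.2.1 then (if long_enough then 3 else 2)
  else if flags.2.2.2 then 4 else 3

-- ===== PRECONDITION & SPEC =====
def Spec_check_password_level (password : String) (out : Int) : Prop := out = check_password_level_alt password
instance (password : String) (out : Int) : Decidable (Spec_check_password_level password out) := by unfold Spec_check_password_level; infer_instance

-- ===== CLAIM (what is proved, stated in full; the proofs are below) =====
def Claim_equal_check_password_level : Prop := ∀ (password : String), Dom_check_password_level password → Spec_check_password_level password (check_password_level password)

-- ===== LEMMAS AND PROOFS =====
-- the fold computes exactly the four any-scans
theorem pvFlags_eq (cs : List Char) (a b c d : Bool) :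
    cs.foldl pvFlagsStep (a, b, c, d) =
      (a || cs.any PySem.Chars.islower,
       b || cs.any PySem.Chars.isdigit,
       c || cs.any PySem.Chars.isupper,
       d || cs.any (fun x => pvPunctuation.contains x)) := by
  induction cs generalizing a b c d with
  | nil => simp
  | cons x xs ih =>
    simp only [List.foldl_cons, List.any_cons, pvFlagsStep, ih, Bool.or_assoc]

-- ===== VERDICT (by name: the statement is the Claim_ definition above) =====
theorem check_password_level_spec : Claim_equal_check_password_level := by
  intro password _
  unfold Spec_check_password_level check_password_level check_password_level_alt
  rw [pvFlags_eq]
  simp only [Bool.false_or]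
  by_cases hl : password.toList.any PySem.Chars.islower <;>
  by_cases hd : password.toList.any PySem.Chars.isdigit <;>
  by_cases hu : password.toList.any PySem.Chars.isupper <;>
  by_cases hp : password.toList.any (fun x => pvPunctuation.contains x) <;>
  simp [hl, hd, hu, hp]
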